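-- pv_equiv track=rewrite | github.com/Libin87/JobPortal | BACKEND/job_matcher.py | are_roles_related
-- ===== SOURCE A (Python) =====
-- def are_roles_related(role1, role2):
--     """Check if two roles are related"""
--     related_roles = {
--         'frontend developer': ['ui developer', 'web developer', 'javascript developer'],
--         'backend developer': ['api developer', 'server developer', 'python developer'],
--         'fullstack developer': ['web developer', 'software engineer', 'frontend developer', 'backend developer'],
--         'data scientist': ['data analyst', 'machine learning engineer', 'ai engineer'],
--         'product designer': ['ui designer', 'ux designer', 'web designer']
--     }
--
--     # Check if roles are in related groups
--     for main_role, related in related_roles.items():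
--         if (role1 in [main_role] + related and role2 in [main_role] + related):
--             return True
--
--     return False
-- ===== SOURCE B (Python) =====
-- # Bitmask inverted index: map each role once to a bitmask of the groups containing
-- # it; a call is then two dict lookups and one integer AND (no per-group scan).
-- _RELATED_ROLES = {
--     'frontend developer': ['ui developer', 'web developer', 'javascript developer'],
--     'backend developer': ['api developer', 'server developer', 'python developer'],
--     'fullstack developer': ['web developer', 'software engineer', 'frontend developer', 'backend developer'],
--     'data scientist': ['data analyst', 'machine learning engineer', 'ai engineer'],
--     'product designer': ['ui designer', 'ux designer', 'web designer']
-- }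
--
-- _ROLE_MASK = {}
-- for _i, (_main, _related) in enumerate(_RELATED_ROLES.items()):
--     for _role in [_main] + _related:
--         _ROLE_MASK[_role] = _ROLE_MASK.get(_role, 0) | (1 << _i)
--
-- def are_roles_related(role1, role2):
--     """Check if two roles are related"""
--     return (_ROLE_MASK.get(role1, 0) & _ROLE_MASK.get(role2, 0)) != 0
-- ===== Notes on version B (the rewrite author's own statement) =====
-- stated objective: alternative
-- what changed: Replaces A's per-call scan over the five role groups (building [main]+related and testing both memberships per group) with a bitmask inverted index built once at module load: each role maps to a bitmask of the groups containing it, and a call is two dict lookups plus one integer AND.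
import Mathlib
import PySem

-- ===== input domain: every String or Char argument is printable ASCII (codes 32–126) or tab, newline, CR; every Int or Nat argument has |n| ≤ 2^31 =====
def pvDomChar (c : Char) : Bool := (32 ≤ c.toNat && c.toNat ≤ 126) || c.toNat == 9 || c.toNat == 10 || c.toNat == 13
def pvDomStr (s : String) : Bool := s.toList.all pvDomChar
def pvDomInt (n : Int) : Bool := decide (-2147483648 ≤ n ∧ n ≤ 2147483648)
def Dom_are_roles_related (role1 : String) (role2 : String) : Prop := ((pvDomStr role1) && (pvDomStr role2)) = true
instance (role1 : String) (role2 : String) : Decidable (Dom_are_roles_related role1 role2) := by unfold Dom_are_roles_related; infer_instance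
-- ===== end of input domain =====

-- B replaces A's per-call scan over the five role groups by a bitmask inverted index
-- built once at module load (role -> bitmask of containing groups); a call is two
-- dict lookups and one integer AND (a different data structure, not shown faster here).

-- ===== PORT A =====
-- the related_roles dict literal (A builds it inside the function; Source B keeps the same
-- table at module level), as a list of (main_role, related) items
def pvRelatedRolesA : List (String × List String) :=
  [("frontend developer", ["ui developer", "web developer", "javascript developer"]),
   ("backend developer", ["api developer", "server developer", "python developer"]),
   ("fullstack developer", ["web developer", "software engineer", "frontend developer", "backend developer"]),
   ("data scientist", ["data analyst", "machine learning engineer", "ai engineer"]),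
   ("product designer", ["ui designer", "ux designer", "web designer"])]

-- the for-loop returning True on the first group containing both roles, else False = List.any
def are_roles_related (role1 : String) (role2 : String) : Bool :=
  pvRelatedRolesA.any (fun e =>
    ([e.1] ++ e.2).contains role1 && ([e.1] ++ e.2).contains role2)

-- ===== PORT B =====
-- Source B's module-level dict literal is the same table (shared constant, built once)
-- _ROLE_MASK, built once by Source B's module-level double loop over enumerate(items)
def pvRoleMask : PySem.Dict String Int :=
  (PySem.List.enumerate pvRelatedRolesA).foldl
    (fun d p => ([p.2.1] ++ p.2.2).foldl
      (fun d r => d.insert r (PySem.Int.bor (d.getD r 0) ((1 : Int) <<< p.1))) d)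
    PySem.Dict.empty

def are_roles_related_alt (role1 : String) (role2 : String) : Bool :=
  decide (PySem.Int.band (pvRoleMask.getD role1 0) (pvRoleMask.getD role2 0) ≠ 0)

-- ===== PRECONDITION & SPEC =====
def Spec_are_roles_related (role1 : String) (role2 : String) (out : Bool) : Prop := out = are_roles_related_alt role1 role2
instance (role1 : String) (role2 : String) (out : Bool) : Decidable (Spec_are_roles_related role1 role2 out) := by unfold Spec_are_roles_related; infer_instance

-- ===== CLAIM (what is proved, stated in full; the proofs are below) =====
def Claim_equal_are_roles_related : Prop := ∀ (role1 : String) (role2 : String), Dom_are_roles_related role1 role2 → Spec_are_roles_related role1 role2 (are_roles_related role1 role2)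

-- ===== LEMMAS AND PROOFS =====

-- proof-side characterisation: the bitmask of groups each role string belongs to
def pvProf (r : String) : Nat :=
  if r = "frontend developer" then 5 else if r = "ui developer" then 1 else
  if r = "web developer" then 5 else if r = "javascript developer" then 1 else
  if r = "backend developer" then 6 else if r = "api developer" then 2 else
  if r = "server developer" then 2 else if r = "python developer" then 2 else
  if r = "fullstack developer" then 4 else if r = "software engineer" then 4 else
  if r = "data scientist" then 8 else if r = "data analyst" then 8 else
  if r = "machine learning engineer" then 8 else if r = "ai engineer" then 8 else
  if r = "product designer" then 16 else if r = "ui designer" then 16 else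
  if r = "ux designer" then 16 else if r = "web designer" then 16 else 0

set_option maxHeartbeats 1000000 in
theorem pvProf_lt (r : String) : pvProf r < 32 := by
  unfold pvProf
  by_cases h1 : r = "frontend developer"
  · subst h1; decide
  rw [if_neg h1]
  by_cases h2 : r = "ui developer"
  · subst h2; decide
  rw [if_neg h2]
  by_cases h3 : r = "web developer"
  · subst h3; decide
  rw [if_neg h3]
  by_cases h4 : r = "javascript developer"
  · subst h4; decide
  rw [if_neg h4]
  by_cases h5 : r = "backend developer"
  · subst h5; decide
  rw [if_neg h5]
  by_cases h6 : r = "api developer"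
  · subst h6; decide
  rw [if_neg h6]
  by_cases h7 : r = "server developer"
  · subst h7; decide
  rw [if_neg h7]
  by_cases h8 : r = "python developer"
  · subst h8; decide
  rw [if_neg h8]
  by_cases h9 : r = "fullstack developer"
  · subst h9; decide
  rw [if_neg h9]
  by_cases h10 : r = "software engineer"
  · subst h10; decide
  rw [if_neg h10]
  by_cases h11 : r = "data scientist"
  · subst h11; decide
  rw [if_neg h11]
  by_cases h12 : r = "data analyst"
  · subst h12; decide
  rw [if_neg h12]
  by_cases h13 : r = "machine learning engineer"
  · subst h13; decide
  rw [if_neg h13]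
  by_cases h14 : r = "ai engineer"
  · subst h14; decide
  rw [if_neg h14]
  by_cases h15 : r = "product designer"
  · subst h15; decide
  rw [if_neg h15]
  by_cases h16 : r = "ui designer"
  · subst h16; decide
  rw [if_neg h16]
  by_cases h17 : r = "ux designer"
  · subst h17; decide
  rw [if_neg h17]
  by_cases h18 : r = "web designer"
  · subst h18; decide
  rw [if_neg h18]
  decide

-- the finished index, item by item
theorem pvRoleMask_items : pvRoleMask.items = [("frontend developer", 5), ("ui developer", 1), ("web developer", 5), ("javascript developer", 1), ("backend developer", 6), ("api developer", 2), ("server developer", 2), ("python developer", 2), ("fullstack developer", 4), ("software engineer", 4), ("data scientist", 8), ("data analyst", 8), ("machine learning engineer", 8), ("ai engineer", 8), ("product designer", 16), ("ui designer", 16), ("ux designer", 16), ("web designer", 16)] := by decide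

set_option maxHeartbeats 1000000 in
theorem pvRoleMask_getD (r : String) : pvRoleMask.getD r 0 = ((pvProf r : Nat) : Int) := by
  unfold pvProf
  by_cases h1 : r = "frontend developer"
  · subst h1; decide
  rw [if_neg h1]
  by_cases h2 : r = "ui developer"
  · subst h2; decide
  rw [if_neg h2]
  by_cases h3 : r = "web developer"
  · subst h3; decide
  rw [if_neg h3]
  by_cases h4 : r = "javascript developer"
  · subst h4; decide
  rw [if_neg h4]
  by_cases h5 : r = "backend developer"
  · subst h5; decide
  rw [if_neg h5]
  by_cases h6 : r = "api developer"
  · subst h6; decide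
  rw [if_neg h6]
  by_cases h7 : r = "server developer"
  · subst h7; decide
  rw [if_neg h7]
  by_cases h8 : r = "python developer"
  · subst h8; decide
  rw [if_neg h8]
  by_cases h9 : r = "fullstack developer"
  · subst h9; decide
  rw [if_neg h9]
  by_cases h10 : r = "software engineer"
  · subst h10; decide
  rw [if_neg h10]
  by_cases h11 : r = "data scientist"
  · subst h11; decide
  rw [if_neg h11]
  by_cases h12 : r = "data analyst"
  · subst h12; decide
  rw [if_neg h12]
  by_cases h13 : r = "machine learning engineer"
  · subst h13; decide
  rw [if_neg h13]
  by_cases h14 : r = "ai engineer"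
  · subst h14; decide
  rw [if_neg h14]
  by_cases h15 : r = "product designer"
  · subst h15; decide
  rw [if_neg h15]
  by_cases h16 : r = "ui designer"
  · subst h16; decide
  rw [if_neg h16]
  by_cases h17 : r = "ux designer"
  · subst h17; decide
  rw [if_neg h17]
  by_cases h18 : r = "web designer"
  · subst h18; decide
  rw [if_neg h18]
  simp [PySem.Dict.getD, PySem.Dict.get?, pvRoleMask_items, Ne.symm h1, Ne.symm h2, Ne.symm h3, Ne.symm h4, Ne.symm h5, Ne.symm h6, Ne.symm h7, Ne.symm h8, Ne.symm h9, Ne.symm h10, Ne.symm h11, Ne.symm h12, Ne.symm h13, Ne.symm h14, Ne.symm h15, Ne.symm h16, Ne.symm h17, Ne.symm h18]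

set_option maxHeartbeats 1000000 in
theorem pvBit0 (r : String) :
    (["frontend developer", "ui developer", "web developer", "javascript developer"] : List String).contains r = (pvProf r).testBit 0 := by
  unfold pvProf
  by_cases h1 : r = "frontend developer"
  · subst h1; decide
  rw [if_neg h1]
  by_cases h2 : r = "ui developer"
  · subst h2; decide
  rw [if_neg h2]
  by_cases h3 : r = "web developer"
  · subst h3; decide
  rw [if_neg h3]
  by_cases h4 : r = "javascript developer"
  · subst h4; decide
  rw [if_neg h4]
  by_cases h5 : r = "backend developer"
  · subst h5; decide
  rw [if_neg h5]
  by_cases h6 : r = "api developer"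
  · subst h6; decide
  rw [if_neg h6]
  by_cases h7 : r = "server developer"
  · subst h7; decide
  rw [if_neg h7]
  by_cases h8 : r = "python developer"
  · subst h8; decide
  rw [if_neg h8]
  by_cases h9 : r = "fullstack developer"
  · subst h9; decide
  rw [if_neg h9]
  by_cases h10 : r = "software engineer"
  · subst h10; decide
  rw [if_neg h10]
  by_cases h11 : r = "data scientist"
  · subst h11; decide
  rw [if_neg h11]
  by_cases h12 : r = "data analyst"
  · subst h12; decide
  rw [if_neg h12]
  by_cases h13 : r = "machine learning engineer"
  · subst h13; decide
  rw [if_neg h13]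
  by_cases h14 : r = "ai engineer"
  · subst h14; decide
  rw [if_neg h14]
  by_cases h15 : r = "product designer"
  · subst h15; decide
  rw [if_neg h15]
  by_cases h16 : r = "ui designer"
  · subst h16; decide
  rw [if_neg h16]
  by_cases h17 : r = "ux designer"
  · subst h17; decide
  rw [if_neg h17]
  by_cases h18 : r = "web designer"
  · subst h18; decide
  rw [if_neg h18]
  simp [h1, h2, h3, h4, h5, h6, h7, h8, h9, h10, h11, h12, h13, h14, h15, h16, h17, h18]

set_option maxHeartbeats 1000000 in
theorem pvBit1 (r : String) :
    (["backend developer", "api developer", "server developer", "python developer"] : List String).contains r = (pvProf r).testBit 1 := by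
  unfold pvProf
  by_cases h1 : r = "frontend developer"
  · subst h1; decide
  rw [if_neg h1]
  by_cases h2 : r = "ui developer"
  · subst h2; decide
  rw [if_neg h2]
  by_cases h3 : r = "web developer"
  · subst h3; decide
  rw [if_neg h3]
  by_cases h4 : r = "javascript developer"
  · subst h4; decide
  rw [if_neg h4]
  by_cases h5 : r = "backend developer"
  · subst h5; decide
  rw [if_neg h5]
  by_cases h6 : r = "api developer"
  · subst h6; decide
  rw [if_neg h6]
  by_cases h7 : r = "server developer"
  · subst h7; decide
  rw [if_neg h7]
  by_cases h8 : r = "python developer"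
  · subst h8; decide
  rw [if_neg h8]
  by_cases h9 : r = "fullstack developer"
  · subst h9; decide
  rw [if_neg h9]
  by_cases h10 : r = "software engineer"
  · subst h10; decide
  rw [if_neg h10]
  by_cases h11 : r = "data scientist"
  · subst h11; decide
  rw [if_neg h11]
  by_cases h12 : r = "data analyst"
  · subst h12; decide
  rw [if_neg h12]
  by_cases h13 : r = "machine learning engineer"
  · subst h13; decide
  rw [if_neg h13]
  by_cases h14 : r = "ai engineer"
  · subst h14; decide
  rw [if_neg h14]
  by_cases h15 : r = "product designer"
  · subst h15; decide
  rw [if_neg h15]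
  by_cases h16 : r = "ui designer"
  · subst h16; decide
  rw [if_neg h16]
  by_cases h17 : r = "ux designer"
  · subst h17; decide
  rw [if_neg h17]
  by_cases h18 : r = "web designer"
  · subst h18; decide
  rw [if_neg h18]
  simp [h1, h2, h3, h4, h5, h6, h7, h8, h9, h10, h11, h12, h13, h14, h15, h16, h17, h18]

set_option maxHeartbeats 1000000 in
theorem pvBit2 (r : String) :
    (["fullstack developer", "web developer", "software engineer", "frontend developer", "backend developer"] : List String).contains r = (pvProf r).testBit 2 := by
  unfold pvProf
  by_cases h1 : r = "frontend developer"
  · subst h1; decide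
  rw [if_neg h1]
  by_cases h2 : r = "ui developer"
  · subst h2; decide
  rw [if_neg h2]
  by_cases h3 : r = "web developer"
  · subst h3; decide
  rw [if_neg h3]
  by_cases h4 : r = "javascript developer"
  · subst h4; decide
  rw [if_neg h4]
  by_cases h5 : r = "backend developer"
  · subst h5; decide
  rw [if_neg h5]
  by_cases h6 : r = "api developer"
  · subst h6; decide
  rw [if_neg h6]
  by_cases h7 : r = "server developer"
  · subst h7; decide
  rw [if_neg h7]
  by_cases h8 : r = "python developer"
  · subst h8; decide
  rw [if_neg h8]
  by_cases h9 : r = "fullstack developer"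
  · subst h9; decide
  rw [if_neg h9]
  by_cases h10 : r = "software engineer"
  · subst h10; decide
  rw [if_neg h10]
  by_cases h11 : r = "data scientist"
  · subst h11; decide
  rw [if_neg h11]
  by_cases h12 : r = "data analyst"
  · subst h12; decide
  rw [if_neg h12]
  by_cases h13 : r = "machine learning engineer"
  · subst h13; decide
  rw [if_neg h13]
  by_cases h14 : r = "ai engineer"
  · subst h14; decide
  rw [if_neg h14]
  by_cases h15 : r = "product designer"
  · subst h15; decide
  rw [if_neg h15]
  by_cases h16 : r = "ui designer"
  · subst h16; decide
  rw [if_neg h16]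
  by_cases h17 : r = "ux designer"
  · subst h17; decide
  rw [if_neg h17]
  by_cases h18 : r = "web designer"
  · subst h18; decide
  rw [if_neg h18]
  simp [h1, h2, h3, h4, h5, h6, h7, h8, h9, h10, h11, h12, h13, h14, h15, h16, h17, h18]

set_option maxHeartbeats 1000000 in
theorem pvBit3 (r : String) :
    (["data scientist", "data analyst", "machine learning engineer", "ai engineer"] : List String).contains r = (pvProf r).testBit 3 := by
  unfold pvProf
  by_cases h1 : r = "frontend developer"
  · subst h1; decide
  rw [if_neg h1]
  by_cases h2 : r = "ui developer"
  · subst h2; decide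
  rw [if_neg h2]
  by_cases h3 : r = "web developer"
  · subst h3; decide
  rw [if_neg h3]
  by_cases h4 : r = "javascript developer"
  · subst h4; decide
  rw [if_neg h4]
  by_cases h5 : r = "backend developer"
  · subst h5; decide
  rw [if_neg h5]
  by_cases h6 : r = "api developer"
  · subst h6; decide
  rw [if_neg h6]
  by_cases h7 : r = "server developer"
  · subst h7; decide
  rw [if_neg h7]
  by_cases h8 : r = "python developer"
  · subst h8; decide
  rw [if_neg h8]
  by_cases h9 : r = "fullstack developer"
  · subst h9; decide
  rw [if_neg h9]
  by_cases h10 : r = "software engineer"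
  · subst h10; decide
  rw [if_neg h10]
  by_cases h11 : r = "data scientist"
  · subst h11; decide
  rw [if_neg h11]
  by_cases h12 : r = "data analyst"
  · subst h12; decide
  rw [if_neg h12]
  by_cases h13 : r = "machine learning engineer"
  · subst h13; decide
  rw [if_neg h13]
  by_cases h14 : r = "ai engineer"
  · subst h14; decide
  rw [if_neg h14]
  by_cases h15 : r = "product designer"
  · subst h15; decide
  rw [if_neg h15]
  by_cases h16 : r = "ui designer"
  · subst h16; decide
  rw [if_neg h16]
  by_cases h17 : r = "ux designer"
  · subst h17; decide
  rw [if_neg h17]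
  by_cases h18 : r = "web designer"
  · subst h18; decide
  rw [if_neg h18]
  simp [h1, h2, h3, h4, h5, h6, h7, h8, h9, h10, h11, h12, h13, h14, h15, h16, h17, h18]

set_option maxHeartbeats 1000000 in
theorem pvBit4 (r : String) :
    (["product designer", "ui designer", "ux designer", "web designer"] : List String).contains r = (pvProf r).testBit 4 := by
  unfold pvProf
  by_cases h1 : r = "frontend developer"
  · subst h1; decide
  rw [if_neg h1]
  by_cases h2 : r = "ui developer"
  · subst h2; decide
  rw [if_neg h2]
  by_cases h3 : r = "web developer"
  · subst h3; decide
  rw [if_neg h3]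
  by_cases h4 : r = "javascript developer"
  · subst h4; decide
  rw [if_neg h4]
  by_cases h5 : r = "backend developer"
  · subst h5; decide
  rw [if_neg h5]
  by_cases h6 : r = "api developer"
  · subst h6; decide
  rw [if_neg h6]
  by_cases h7 : r = "server developer"
  · subst h7; decide
  rw [if_neg h7]
  by_cases h8 : r = "python developer"
  · subst h8; decide
  rw [if_neg h8]
  by_cases h9 : r = "fullstack developer"
  · subst h9; decide
  rw [if_neg h9]
  by_cases h10 : r = "software engineer"
  · subst h10; decide
  rw [if_neg h10]
  by_cases h11 : r = "data scientist"
  · subst h11; decide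
  rw [if_neg h11]
  by_cases h12 : r = "data analyst"
  · subst h12; decide
  rw [if_neg h12]
  by_cases h13 : r = "machine learning engineer"
  · subst h13; decide
  rw [if_neg h13]
  by_cases h14 : r = "ai engineer"
  · subst h14; decide
  rw [if_neg h14]
  by_cases h15 : r = "product designer"
  · subst h15; decide
  rw [if_neg h15]
  by_cases h16 : r = "ui designer"
  · subst h16; decide
  rw [if_neg h16]
  by_cases h17 : r = "ux designer"
  · subst h17; decide
  rw [if_neg h17]
  by_cases h18 : r = "web designer"
  · subst h18; decide
  rw [if_neg h18]
  simp [h1, h2, h3, h4, h5, h6, h7, h8, h9, h10, h11, h12, h13, h14, h15, h16, h17, h18]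

theorem pvA_prof (r1 r2 : String) :
    are_roles_related r1 r2 =
      (((pvProf r1).testBit 0 && (pvProf r2).testBit 0) ||
       ((pvProf r1).testBit 1 && (pvProf r2).testBit 1) ||
       ((pvProf r1).testBit 2 && (pvProf r2).testBit 2) ||
       ((pvProf r1).testBit 3 && (pvProf r2).testBit 3) ||
       ((pvProf r1).testBit 4 && (pvProf r2).testBit 4)) := by
  unfold are_roles_related
  simp only [pvRelatedRolesA, List.any_cons, List.any_nil, List.singleton_append,
    Bool.or_false, pvBit0, pvBit1, pvBit2, pvBit3, pvBit4]
  simp [Bool.or_assoc]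

theorem pvB_prof (r1 r2 : String) :
    are_roles_related_alt r1 r2 = decide (pvProf r1 &&& pvProf r2 ≠ 0) := by
  unfold are_roles_related_alt
  rw [pvRoleMask_getD r1, pvRoleMask_getD r2]
  simp [PySem.Int.band_natCast]

set_option maxHeartbeats 1000000 in
theorem pvBits_band : ∀ p < 32, ∀ q < 32,
    ((Nat.testBit p 0 && Nat.testBit q 0) ||
     (Nat.testBit p 1 && Nat.testBit q 1) ||
     (Nat.testBit p 2 && Nat.testBit q 2) ||
     (Nat.testBit p 3 && Nat.testBit q 3) ||
     (Nat.testBit p 4 && Nat.testBit q 4)) = decide (p &&& q ≠ 0) := by decide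

-- ===== VERDICT (by name: the statement is the Claim_ definition above) =====
theorem are_roles_related_spec : Claim_equal_are_roles_related := by
  intro r1 r2 _
  unfold Spec_are_roles_related
  rw [pvA_prof, pvB_prof]
  exact pvBits_band _ (pvProf_lt r1) _ (pvProf_lt r2)
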